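-- pv_equiv track=rewrite | github.com/ben133290/stp-pho-solver | experiments/connectedness.py | connectedness
-- ===== SOURCE A (Python) =====
-- def connectedness(pattern):
--     def is_connected_by_index(a, b):
--         if (a + 4 == b) or (a + 1 == b) or (a - 1 == b) or (a - 4 == b):
--             return 1
--         else:
--             return 0
--
--     unique_pairs = [is_connected_by_index(pattern[i], pattern[j]) for i in range(len(pattern)) for j in
--                     range(i + 1, len(pattern))]
--     return sum(unique_pairs)
-- ===== SOURCE B (Python) =====
-- def connectedness(pattern):
--     total = 0
--     seen = {}
--     for x in pattern:
--         total += seen.get(x - 4, 0) + seen.get(x - 1, 0) + seen.get(x + 1, 0) + seen.get(x + 4, 0)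
--         seen[x] = seen.get(x, 0) + 1
--     return total
-- ===== Notes on version B (the rewrite author's own statement) =====
-- stated objective: faster
-- what changed: Replaced A's quadratic scan over all index pairs with a single pass that keeps a dict of counts of values seen so far and adds the counts of the four neighbouring values (x±1, x±4) at each element.
import Mathlib
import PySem

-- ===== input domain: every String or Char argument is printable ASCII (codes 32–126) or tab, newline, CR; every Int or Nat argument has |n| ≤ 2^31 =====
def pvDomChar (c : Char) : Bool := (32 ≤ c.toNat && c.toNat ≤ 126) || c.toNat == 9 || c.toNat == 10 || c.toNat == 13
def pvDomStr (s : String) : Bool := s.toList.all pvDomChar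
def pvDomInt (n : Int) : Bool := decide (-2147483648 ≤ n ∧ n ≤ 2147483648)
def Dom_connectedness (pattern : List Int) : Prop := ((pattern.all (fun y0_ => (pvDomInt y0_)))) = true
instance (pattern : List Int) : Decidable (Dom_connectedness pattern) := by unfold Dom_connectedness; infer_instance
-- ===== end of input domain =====

-- B replaces A's quadratic all-pairs scan by a single pass that keeps a dict of
-- counts of the values seen so far (faster: O(n^2) → O(n)).

-- ===== PORT A =====
-- Python's local helper is_connected_by_index
def pvIsConn (a b : Int) : Int :=
  if a + 4 = b ∨ a + 1 = b ∨ a - 1 = b ∨ a - 4 = b then 1 else 0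

def connectedness (pattern : List Int) : Int :=
  let uniquePairs :=
    (PySem.List.pyRange 0 (pattern.length : Int) 1).flatMap (fun i =>
      (PySem.List.pyRange (i + 1) (pattern.length : Int) 1).map (fun j =>
        pvIsConn (PySem.List.pyGetD pattern i 0) (PySem.List.pyGetD pattern j 0)))
  uniquePairs.foldl (· + ·) 0

-- ===== PORT B =====
-- one step of Source B's loop body: add the four neighbour counts, then record x
def pvStep (st : PySem.Dict Int Int × Int) (x : Int) : PySem.Dict Int Int × Int :=
  let seen := st.1
  let total := st.2 + seen.getD (x - 4) 0 + seen.getD (x - 1) 0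
               + seen.getD (x + 1) 0 + seen.getD (x + 4) 0
  (seen.insert x (seen.getD x 0 + 1), total)

def connectedness_alt (pattern : List Int) : Int :=
  (pattern.foldl pvStep (PySem.Dict.empty, 0)).2

-- ===== PRECONDITION & SPEC =====
def Spec_connectedness (pattern : List Int) (out : Int) : Prop := out = connectedness_alt pattern
instance (pattern : List Int) (out : Int) : Decidable (Spec_connectedness pattern out) := by unfold Spec_connectedness; infer_instance

-- ===== CLAIM (what is proved, stated in full; the proofs are below) =====
def Claim_equal_connectedness : Prop := ∀ (pattern : List Int), Dom_connectedness pattern → Spec_connectedness pattern (connectedness pattern)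

-- ===== LEMMAS AND PROOFS =====

-- A's result, written as a sum over Nat indices
def pvSumA (xs : List Int) : Int :=
  ((List.range xs.length).map
    (fun k => ((xs.drop (k + 1)).map (pvIsConn (xs.getD k 0))).sum)).sum

-- pair count, head-recursively: pairs of the head with the tail, plus pairs inside the tail
def pvPC : List Int → Int
  | [] => 0
  | x :: r => (r.map (pvIsConn x)).sum + pvPC r

-- how many elements of p are a neighbour of x
def pvC (p : List Int) (x : Int) : Int := (p.map (fun y => pvIsConn y x)).sum

-- B's total, as a recursion carrying the already-seen prefix p
def pvPCB : List Int → List Int → Int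
  | _, [] => 0
  | p, x :: r => pvC p x + pvPCB (p ++ [x]) r

theorem list_sum_flatMap {α : Type} (l : List α) (f : α → List Int) :
    (l.flatMap f).sum = (l.map (fun a => (f a).sum)).sum := by
  induction l with
  | nil => rfl
  | cons x r ih => simp [List.flatMap_cons, List.sum_append, ih]

theorem inner_eq (xs : List Int) (a : Int) (k : Nat) :
    (PySem.List.pyRange ((k : Int) + 1) (xs.length : Int) 1).map
      (fun j => pvIsConn a (PySem.List.pyGetD xs j 0))
    = (xs.drop (k + 1)).map (pvIsConn a) := by
  have h := PySem.List.map_pyGetD_pyRange xs 0 (a := (k : Int) + 1) (by positivity)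
  have hlen : PySem.List.len xs = (xs.length : Int) := by simp [PySem.List.len]
  rw [hlen] at h
  have : (PySem.List.pyRange ((k : Int) + 1) (xs.length : Int) 1).map
      (fun j => pvIsConn a (PySem.List.pyGetD xs j 0))
      = ((PySem.List.pyRange ((k : Int) + 1) (xs.length : Int) 1).map
          (fun j => PySem.List.pyGetD xs j 0)).map (pvIsConn a) := by
    rw [List.map_map]; rfl
  rw [this, h]
  congr 1

theorem conn_eq_sumA (xs : List Int) : connectedness xs = pvSumA xs := by
  unfold connectedness pvSumA
  rw [PySem.List.foldl_add _ (fun x => x) 0]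
  simp only [List.map_id_fun', id]
  rw [PySem.List.pyRange_zero_natCast, List.flatMap_map, list_sum_flatMap, zero_add]
  congr 1
  apply List.map_congr_left
  intro k _
  rw [PySem.List.pyGetD_natCast, inner_eq]

theorem sumA_eq_pc (xs : List Int) : pvSumA xs = pvPC xs := by
  induction xs with
  | nil => rfl
  | cons x r _ =>
    unfold pvSumA pvPC
    rw [show (x :: r).length = r.length + 1 from rfl, List.range_succ_eq_map]
    simp only [List.map_cons, List.map_map, List.sum_cons]
    have h0 : ((x :: r).drop 1).map (pvIsConn ((x :: r).getD 0 0)) = r.map (pvIsConn x) := rfl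
    rw [h0]
    congr 1

-- the four neighbour values are pairwise distinct, so pvC is a sum of four counts
theorem pvIsConn_split (y x : Int) :
    pvIsConn y x = (if y = x - 4 then 1 else 0) + (if y = x - 1 then 1 else 0)
      + (if y = x + 1 then 1 else 0) + (if y = x + 4 then 1 else 0) := by
  unfold pvIsConn
  split_ifs <;> omega

theorem pvC_counts (p : List Int) (x : Int) :
    pvC p x = (p.count (x - 4) : Int) + p.count (x - 1) + p.count (x + 1) + p.count (x + 4) := by
  induction p with
  | nil => simp [pvC]
  | cons y p ih =>
    simp only [pvC, List.map_cons, List.sum_cons] at *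
    rw [ih, pvIsConn_split]
    simp only [List.count_cons, beq_iff_eq]
    push_cast
    split_ifs <;> omega

def pvDictOf (p : List Int) : PySem.Dict Int Int :=
  p.foldl (fun d x => d.insert x (d.getD x 0 + 1)) PySem.Dict.empty

theorem pvDictOf_getD (p : List Int) (v : Int) :
    (pvDictOf p).getD v 0 = (p.count v : Int) := by
  unfold pvDictOf
  rw [PySem.Dict.getD_foldl_insert_add_one]
  simp [PySem.Dict.getD_empty]

theorem loop_eq (r p : List Int) (t : Int) :
    r.foldl pvStep (pvDictOf p, t) = (pvDictOf (p ++ r), t + pvPCB p r) := by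
  induction r generalizing p t with
  | nil => simp [pvPCB]
  | cons x r ih =>
    have hstep : pvStep (pvDictOf p, t) x = (pvDictOf (p ++ [x]), t + pvC p x) := by
      unfold pvStep
      simp only [Prod.mk.injEq]
      constructor
      · unfold pvDictOf; rw [List.foldl_append]; rfl
      · rw [pvDictOf_getD, pvDictOf_getD, pvDictOf_getD, pvDictOf_getD, pvC_counts]
        ring
    rw [List.foldl_cons, hstep, ih]
    simp only [Prod.mk.injEq]
    constructor
    · congr 1; simp
    · rw [show pvPCB p (x :: r) = pvC p x + pvPCB (p ++ [x]) r from rfl]; ring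

theorem pvC_nil_sum (xs : List Int) : (xs.map (pvC [])).sum = 0 := by
  induction xs with
  | nil => rfl
  | cons a r ih => simpa [pvC] using ih

theorem alt_eq_pcb (xs : List Int) : connectedness_alt xs = pvPCB [] xs := by
  unfold connectedness_alt
  have h : (PySem.Dict.empty, (0 : Int)) = (pvDictOf [], 0) := rfl
  rw [h, loop_eq]
  simp

theorem pcb_eq (xs : List Int) : ∀ p, pvPCB p xs = (xs.map (pvC p)).sum + pvPC xs := by
  induction xs with
  | nil => intro p; simp [pvPCB, pvPC]
  | cons x r ih =>
    intro p
    unfold pvPCB pvPC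
    rw [ih]
    have hx : (r.map (pvC (p ++ [x]))).sum = (r.map (pvC p)).sum + (r.map (pvIsConn x)).sum := by
      have : ∀ y, pvC (p ++ [x]) y = pvC p y + pvIsConn x y := by
        intro y; unfold pvC; simp [List.sum_append]
      calc (r.map (pvC (p ++ [x]))).sum
          = (r.map (fun y => pvC p y + pvIsConn x y)).sum := by
            congr 1; exact List.map_congr_left (fun y _ => this y)
        _ = (r.map (pvC p)).sum + (r.map (pvIsConn x)).sum :=
            PySem.List.sum_map_add_int r (pvC p) (pvIsConn x)
    rw [hx]
    simp only [List.map_cons, List.sum_cons]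
    ring

-- ===== VERDICT (by name: the statement is the Claim_ definition above) =====
theorem connectedness_spec : Claim_equal_connectedness := by
  intro pattern _
  unfold Spec_connectedness
  rw [conn_eq_sumA, sumA_eq_pc, alt_eq_pcb, pcb_eq, pvC_nil_sum]
  ring
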